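-- pv_equiv track=rewrite | github.com/gractheh/PORTGUARD | portguard/report_generator.py | _build_compliance_grid
-- ===== SOURCE A (Python) =====
-- _COMPLIANCE_PROGRAMS: list[tuple[str, list[str]]] = [
--     ("OFAC Sanctions",       ["ofac", "sanctions", "embargo", "sdn"]),
--     ("Section 301 Tariffs",  ["section 301", "301 tariff"]),
--     ("AD/CVD Orders",        ["ad/cvd", "antidumping", "countervailing"]),
--     ("UFLPA (Forced Labor)", ["uflpa", "forced labor", "xinjiang"]),
--     ("ISF (10+2 Filing)",    ["isf", "importer security filing", "10+2"]),
--     ("PGA Requirements",     ["pga", "fda", "usda", "epa", "fcc", "atf", "prior notice",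
--                                "fcc id", "equipment authorization"]),
-- ]
--
-- def _build_compliance_grid(explanations: list[str]) -> list[dict]:
--     """Map findings to compliance programs and return a status grid."""
--     rows: list[dict] = []
--     for program_name, keywords in _COMPLIANCE_PROGRAMS:
--         matches = [e for e in explanations
--                    if any(kw in e.lower() for kw in keywords)]
--         if matches:
--             detail = matches[0]
--             if "isf" in program_name.lower():
--                 status = "INCOMPLETE"
--             elif "pga" in program_name.lower():
--                 status = "FLAGGED"
--             else:
--                 status = "HIT"
--         else:
--             detail = "No issues identified."
--             status = "CLEAR"
--         rows.append({"program": program_name, "status": status, "detail": detail})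
--     return rows
-- ===== SOURCE B (Python) =====
-- _COMPLIANCE_PROGRAMS: list[tuple[str, list[str]]] = [
--     ("OFAC Sanctions",       ["ofac", "sanctions", "embargo", "sdn"]),
--     ("Section 301 Tariffs",  ["section 301", "301 tariff"]),
--     ("AD/CVD Orders",        ["ad/cvd", "antidumping", "countervailing"]),
--     ("UFLPA (Forced Labor)", ["uflpa", "forced labor", "xinjiang"]),
--     ("ISF (10+2 Filing)",    ["isf", "importer security filing", "10+2"]),
--     ("PGA Requirements",     ["pga", "fda", "usda", "epa", "fcc", "atf", "prior notice",
--                                "fcc id", "equipment authorization"]),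
-- ]
--
-- def _build_compliance_grid(explanations: list[str]) -> list[dict]:
--     """One pass over explanations building a first-hit index, then one emit pass."""
--     first_hit: dict[str, str] = {}
--     for e in explanations:
--         low = e.lower()
--         for name, keywords in _COMPLIANCE_PROGRAMS:
--             if name not in first_hit and any(kw in low for kw in keywords):
--                 first_hit[name] = e
--     rows: list[dict] = []
--     for name, _ in _COMPLIANCE_PROGRAMS:
--         if name in first_hit:
--             lname = name.lower()
--             if "isf" in lname:
--                 status = "INCOMPLETE"
--             elif "pga" in lname:
--                 status = "FLAGGED"
--             else:
--                 status = "HIT"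
--             rows.append({"program": name, "status": status, "detail": first_hit[name]})
--         else:
--             rows.append({"program": name, "status": "CLEAR",
--                          "detail": "No issues identified."})
--     return rows
-- ===== Notes on version B (the rewrite author's own statement) =====
-- stated objective: alternative
-- what changed: Replaces six per-program scans over the explanation list (each re-lowercasing every explanation) with a single pass over explanations that lowercases each once and records the first matching explanation per program in a dict, followed by an emit pass over the programs.
import Mathlib
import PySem

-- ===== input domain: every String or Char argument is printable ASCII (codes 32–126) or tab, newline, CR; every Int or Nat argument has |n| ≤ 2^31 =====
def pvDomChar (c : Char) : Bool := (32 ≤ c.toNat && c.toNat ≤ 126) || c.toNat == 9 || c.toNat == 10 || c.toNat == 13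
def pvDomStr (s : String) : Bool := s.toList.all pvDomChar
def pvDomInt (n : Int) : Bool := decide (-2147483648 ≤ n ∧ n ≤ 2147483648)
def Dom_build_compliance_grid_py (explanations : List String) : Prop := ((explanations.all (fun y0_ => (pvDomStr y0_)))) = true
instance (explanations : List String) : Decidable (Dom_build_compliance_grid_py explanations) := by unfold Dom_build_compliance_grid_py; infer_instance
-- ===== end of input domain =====

-- B replaces six per-program scans of the explanations with one first-hit-indexing pass
-- over explanations plus an emit pass over the programs (objective: alternative decomposition).


-- module-level constant _COMPLIANCE_PROGRAMS (shared data of both Pythons)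
def pvPrograms : List (String × List String) := [
  ("OFAC Sanctions",       ["ofac", "sanctions", "embargo", "sdn"]),
  ("Section 301 Tariffs",  ["section 301", "301 tariff"]),
  ("AD/CVD Orders",        ["ad/cvd", "antidumping", "countervailing"]),
  ("UFLPA (Forced Labor)", ["uflpa", "forced labor", "xinjiang"]),
  ("ISF (10+2 Filing)",    ["isf", "importer security filing", "10+2"]),
  ("PGA Requirements",     ["pga", "fda", "usda", "epa", "fcc", "atf", "prior notice",
                            "fcc id", "equipment authorization"])]

-- ===== PORT A =====
-- A: for each program, scan all explanations for matches, take matches[0].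
def build_compliance_grid_py (explanations : List String) : List (List (String × String)) :=
  pvPrograms.foldl (fun rows pk =>
    let matchesL := explanations.filter (fun e => pk.2.any (fun kw => PySem.Str.isIn kw (PySem.Str.lower e)))
    match matchesL with
    | [] => rows ++ [[("program", pk.1), ("status", "CLEAR"), ("detail", "No issues identified.")]]
    | m0 :: _ =>
      let status := if PySem.Str.isIn "isf" (PySem.Str.lower pk.1) then "INCOMPLETE"
        else if PySem.Str.isIn "pga" (PySem.Str.lower pk.1) then "FLAGGED" else "HIT"
      rows ++ [[("program", pk.1), ("status", status), ("detail", m0)]]) []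

-- ===== PORT B =====
-- B: one pass over explanations recording the first matching explanation per program.
def pvStep (d : PySem.Dict String String) (e : String) : PySem.Dict String String :=
  let low := PySem.Str.lower e
  pvPrograms.foldl (fun d pk =>
    if !(d.contains pk.1) && pk.2.any (fun kw => PySem.Str.isIn kw low) then d.insert pk.1 e else d) d

def build_compliance_grid_py_alt (explanations : List String) : List (List (String × String)) :=
  let firstHit := explanations.foldl pvStep PySem.Dict.empty
  pvPrograms.foldl (fun rows pk =>
    match firstHit.get? pk.1 with
    | some detail =>
      let lname := PySem.Str.lower pk.1
      let status := if PySem.Str.isIn "isf" lname then "INCOMPLETE"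
        else if PySem.Str.isIn "pga" lname then "FLAGGED" else "HIT"
      rows ++ [[("program", pk.1), ("status", status), ("detail", detail)]]
    | none => rows ++ [[("program", pk.1), ("status", "CLEAR"), ("detail", "No issues identified.")]]) []

-- ===== PRECONDITION & SPEC =====
def Spec_build_compliance_grid_py (explanations : List String) (out : List (List (String × String))) : Prop := out = build_compliance_grid_py_alt explanations
instance (explanations : List String) (out : List (List (String × String))) : Decidable (Spec_build_compliance_grid_py explanations out) := by unfold Spec_build_compliance_grid_py; infer_instance

-- ===== CLAIM (what is proved, stated in full; the proofs are below) =====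
def Claim_equal_build_compliance_grid_py : Prop := ∀ (explanations : List String), Dom_build_compliance_grid_py explanations → Spec_build_compliance_grid_py explanations (build_compliance_grid_py explanations)

-- ===== LEMMAS AND PROOFS =====

-- the per-explanation match predicate shared by both analyses
def pvMatch (kws : List String) (e : String) : Bool :=
  kws.any (fun kw => PySem.Str.isIn kw (PySem.Str.lower e))

-- head of a filter is find?
theorem pv_head?_filter {α : Type} (p : α → Bool) (l : List α) :
    (l.filter p).head? = l.find? p := by
  induction l with
  | nil => rfl
  | cons x xs ih => by_cases h : p x = true <;> simp [List.filter, List.find?, h, ih]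

-- an inner pass over programs whose names all differ from n leaves get? n unchanged
theorem pv_foldl_get?_of_ne (n e : String) (ps : List (String × List String))
    (hp : ∀ p ∈ ps, p.1 ≠ n) : ∀ d : PySem.Dict String String,
    (ps.foldl (fun d pk =>
      if !(d.contains pk.1) && pk.2.any (fun kw => PySem.Str.isIn kw (PySem.Str.lower e)) then d.insert pk.1 e else d) d).get? n = d.get? n := by
  induction ps with
  | nil => intro d; rfl
  | cons q qs ih =>
    intro d
    have hq : q.1 ≠ n := hp q (by simp)
    have hqs : ∀ p ∈ qs, p.1 ≠ n := fun p hm => hp p (by simp [hm])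
    simp only [List.foldl_cons]
    rw [ih hqs]
    split
    · exact PySem.Dict.get?_insert_of_ne d e (Ne.symm hq)
    · rfl

-- effect of one pvStep on the entry of program n (n occurring once in pvPrograms with keywords kws)
theorem pv_step_get? (n : String) (kws : List String)
    (ps₁ ps₂ : List (String × List String))
    (hsplit : pvPrograms = ps₁ ++ (n, kws) :: ps₂)
    (h1 : ∀ p ∈ ps₁, p.1 ≠ n) (h2 : ∀ p ∈ ps₂, p.1 ≠ n)
    (d : PySem.Dict String String) (e : String) :
    (pvStep d e).get? n =
      match d.get? n with
      | some v => some v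
      | none => if pvMatch kws e then some e else none := by
  unfold pvStep
  rw [hsplit]
  simp only [List.foldl_append, List.foldl_cons]
  rw [pv_foldl_get?_of_ne n e ps₂ h2]
  have hd1 : (ps₁.foldl (fun d pk =>
      if !(d.contains pk.1) && pk.2.any (fun kw => PySem.Str.isIn kw (PySem.Str.lower e)) then d.insert pk.1 e else d) d).get? n = d.get? n :=
    pv_foldl_get?_of_ne n e ps₁ h1 d
  set d1 := ps₁.foldl (fun d pk =>
      if !(d.contains pk.1) && pk.2.any (fun kw => PySem.Str.isIn kw (PySem.Str.lower e)) then d.insert pk.1 e else d) d with hd1def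
  have hc : d1.contains n = (d1.get? n).isSome := PySem.Dict.contains_eq_isSome_get? d1 n
  cases hg : d.get? n with
  | some v =>
    have hct : d1.contains n = true := by rw [hc, hd1, hg]; rfl
    rw [hct]
    simp only [Bool.not_true, Bool.false_and]
    rw [if_neg (by decide : ¬ (false = true)), hd1]
    exact hg
  | none =>
    have hcf : d1.contains n = false := by rw [hc, hd1, hg]; rfl
    rw [hcf]
    simp only [Bool.not_false, Bool.true_and]
    by_cases hm : (kws.any fun kw => PySem.Str.isIn kw (PySem.Str.lower e)) = true
    · rw [if_pos hm, if_pos (show pvMatch kws e = true from hm)]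
      simp [PySem.Dict.get?_insert_self]
    · rw [if_neg hm, if_neg (show ¬ pvMatch kws e = true from hm), hd1]
      exact hg

-- the whole first pass: the dict entry for program n is the first matching explanation
theorem pv_fold_get? (n : String) (kws : List String)
    (ps₁ ps₂ : List (String × List String))
    (hsplit : pvPrograms = ps₁ ++ (n, kws) :: ps₂)
    (h1 : ∀ p ∈ ps₁, p.1 ≠ n) (h2 : ∀ p ∈ ps₂, p.1 ≠ n) :
    ∀ (es : List String) (d : PySem.Dict String String),
    (es.foldl pvStep d).get? n = (d.get? n).or (es.find? (pvMatch kws)) := by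
  intro es
  induction es with
  | nil => intro d; simp
  | cons e es ih =>
    intro d
    simp only [List.foldl_cons]
    rw [ih (pvStep d e), pv_step_get? n kws ps₁ ps₂ hsplit h1 h2 d e]
    cases hg : d.get? n with
    | some v => simp
    | none =>
      by_cases hm : pvMatch kws e = true
      · simp [hm, List.find?]
      · simp only [Bool.not_eq_true] at hm
        simp [hm, List.find?]

-- one emitted row: A's filter-based row equals B's dict-based row
theorem pv_row_eq (name : String) (kws : List String) (es : List String)
    (rows : List (List (String × String))) :
    (match es.filter (fun e => kws.any (fun kw => PySem.Str.isIn kw (PySem.Str.lower e))) with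
      | [] => rows ++ [[("program", name), ("status", "CLEAR"), ("detail", "No issues identified.")]]
      | m0 :: _ =>
        let status := if PySem.Str.isIn "isf" (PySem.Str.lower name) then "INCOMPLETE"
          else if PySem.Str.isIn "pga" (PySem.Str.lower name) then "FLAGGED" else "HIT"
        rows ++ [[("program", name), ("status", status), ("detail", m0)]]) =
    (match es.find? (pvMatch kws) with
      | some detail =>
        let lname := PySem.Str.lower name
        let status := if PySem.Str.isIn "isf" lname then "INCOMPLETE"
          else if PySem.Str.isIn "pga" lname then "FLAGGED" else "HIT"
        rows ++ [[("program", name), ("status", status), ("detail", detail)]]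
      | none => rows ++ [[("program", name), ("status", "CLEAR"), ("detail", "No issues identified.")]]) := by
  have hh : es.find? (pvMatch kws) =
      (es.filter (fun e => kws.any (fun kw => PySem.Str.isIn kw (PySem.Str.lower e)))).head? :=
    (pv_head?_filter _ es).symm
  cases hf : es.filter (fun e => kws.any (fun kw => PySem.Str.isIn kw (PySem.Str.lower e))) with
  | nil =>
    rw [hf] at hh; simp only [List.head?_nil] at hh
    rw [hh]
  | cons m0 t =>
    rw [hf] at hh; simp only [List.head?_cons] at hh
    rw [hh]

-- ===== VERDICT (by name: the statement is the Claim_ definition above) =====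
theorem build_compliance_grid_py_spec : Claim_equal_build_compliance_grid_py := by
  intro es _
  unfold Spec_build_compliance_grid_py build_compliance_grid_py build_compliance_grid_py_alt
  have g : ∀ (n : String) (kws : List String) (ps₁ ps₂ : List (String × List String)),
      pvPrograms = ps₁ ++ (n, kws) :: ps₂ → (∀ p ∈ ps₁, p.1 ≠ n) → (∀ p ∈ ps₂, p.1 ≠ n) →
      (es.foldl pvStep PySem.Dict.empty).get? n = es.find? (pvMatch kws) := by
    intro n kws ps₁ ps₂ hs h1 h2
    rw [pv_fold_get? n kws ps₁ ps₂ hs h1 h2 es PySem.Dict.empty]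
    simp [PySem.Dict.get?_empty]
  have g1 := g "OFAC Sanctions" ["ofac", "sanctions", "embargo", "sdn"] [] (pvPrograms.drop 1) (by decide) (by decide) (by decide)
  have g2 := g "Section 301 Tariffs" ["section 301", "301 tariff"] (pvPrograms.take 1) (pvPrograms.drop 2) (by decide) (by decide) (by decide)
  have g3 := g "AD/CVD Orders" ["ad/cvd", "antidumping", "countervailing"] (pvPrograms.take 2) (pvPrograms.drop 3) (by decide) (by decide) (by decide)
  have g4 := g "UFLPA (Forced Labor)" ["uflpa", "forced labor", "xinjiang"] (pvPrograms.take 3) (pvPrograms.drop 4) (by decide) (by decide) (by decide)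
  have g5 := g "ISF (10+2 Filing)" ["isf", "importer security filing", "10+2"] (pvPrograms.take 4) (pvPrograms.drop 5) (by decide) (by decide) (by decide)
  have g6 := g "PGA Requirements" ["pga", "fda", "usda", "epa", "fcc", "atf", "prior notice", "fcc id", "equipment authorization"] (pvPrograms.take 5) [] (by decide) (by decide) (by decide)
  simp only [pvPrograms, List.foldl_cons, List.foldl_nil]
  rw [g1, g2, g3, g4, g5, g6]
  rw [pv_row_eq, pv_row_eq, pv_row_eq, pv_row_eq, pv_row_eq, pv_row_eq]
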